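-- pv_equiv track=rewrite | github.com/InqqDev/Studium | Aufgabe 1/epr_abgabe_1_3.py | friday_13th
-- ===== SOURCE A (Python) =====
-- def friday_13th(leap_year):
--     months_days = [31, 28, 31, 30, 31, 30, 31, 31, 30, 31, 30, 31]
--     months_days [1] += leap_year
--     f_13_list = []
--
-- # loop goes through all months and days in a week. If it finds a friday 13th it adds it to the list
--     for starting_week_day in range(7):
--         friday_13 = 0
--         week_day = starting_week_day
--         for month in months_days:
--             for day in range(month):
--                 week_day = (week_day + 1) % 7
--                 if week_day == 4 and day == 12:
--                     friday_13 = friday_13 + 1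
--         f_13_list.append(friday_13)
--     return f_13_list
-- ===== SOURCE B (Python) =====
-- def friday_13th(leap_year):
--     months_days = [31, 28 + leap_year, 31, 30, 31, 30, 31, 31, 30, 31, 30, 31]
--     # day-of-year offset at which each month starts
--     offsets = []
--     total = 0
--     for m in months_days:
--         offsets.append(total)
--         total += m
--     # with the year starting on weekday s, the 13th of a month falls on (s + offset + 13) % 7
--     return [sum(1 for off in offsets if (s + off + 13) % 7 == 4) for s in range(7)]
-- ===== Notes on version B (the rewrite author's own statement) =====
-- stated objective: faster
-- what changed: B drops the per-day simulation: it prefix-sums month lengths into start offsets once and computes each 13th's weekday directly as (s + offset + 13) % 7; Pre_ excludes leap_year < -15, degenerate inputs on which A's February has fewer than 13 days (or negative length) so no month-by-month weekday formula applies.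
-- outside the precondition, e.g. on friday_13th(-16): A returns [1, 2, 2, 1, 2, 2, 1], B returns [1, 2, 3, 1, 2, 2, 1]; on friday_13th(-100): A returns [2, 1, 2, 1, 1, 2, 2], B returns [1, 2, 3, 1, 2, 2, 1]
import Mathlib
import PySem

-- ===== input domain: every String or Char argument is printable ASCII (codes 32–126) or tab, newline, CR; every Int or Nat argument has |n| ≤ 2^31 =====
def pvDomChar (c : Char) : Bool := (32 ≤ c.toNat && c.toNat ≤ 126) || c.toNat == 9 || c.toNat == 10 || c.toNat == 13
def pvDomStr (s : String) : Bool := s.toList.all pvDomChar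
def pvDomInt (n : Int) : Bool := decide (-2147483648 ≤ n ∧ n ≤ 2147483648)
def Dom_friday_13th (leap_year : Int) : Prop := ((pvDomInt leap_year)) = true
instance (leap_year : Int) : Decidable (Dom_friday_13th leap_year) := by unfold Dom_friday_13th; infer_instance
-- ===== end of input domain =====

-- B replaces A's per-day weekday simulation with prefix-summed month start offsets and the
-- closed formula (s + offset + 13) % 7 per month (faster in a timing run).


-- ===== PORT A =====
-- literal transliteration of A: months_days[1] += leap_year (index 1 is in range, so pyGet? is some
-- and .getD 0 never takes its default), then for each starting weekday simulate every day of the year.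
def friday_13th (leap_year : Int) : List Int :=
  let months_days : List Int := [31, 28, 31, 30, 31, 30, 31, 31, 30, 31, 30, 31]
  let months_days := months_days.set 1 ((PySem.List.pyGet? months_days 1).getD 0 + leap_year)
  (PySem.List.pyRange 0 7 1).foldl (fun f_13_list starting_week_day =>
    let st := months_days.foldl (fun st month =>
      (PySem.List.pyRange 0 month 1).foldl (fun (st : Int × Int) day =>
        let week_day := PySem.Int.mod (st.1 + 1) 7
        let friday_13 := if week_day = 4 ∧ day = 12 then st.2 + 1 else st.2
        (week_day, friday_13)) st) ((starting_week_day : Int), (0 : Int))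
    f_13_list ++ [st.2]) []

-- ===== PORT B =====
-- literal transliteration of Source B: build the list of month start offsets by one prefix-sum pass,
-- then for each starting weekday s count the offsets whose 13th falls on a Friday.
def friday_13th_alt (leap_year : Int) : List Int :=
  let months_days : List Int := [31, 28 + leap_year, 31, 30, 31, 30, 31, 31, 30, 31, 30, 31]
  let st := months_days.foldl (fun (st : List Int × Int) m => (st.1 ++ [st.2], st.2 + m)) ([], 0)
  let offsets := st.1
  (PySem.List.pyRange 0 7 1).map (fun s =>
    offsets.foldl (fun (acc : Int) off =>
      if PySem.Int.mod (s + off + 13) 7 = 4 then acc + 1 else acc) 0)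

-- ===== PRECONDITION & SPEC =====
-- Pre_ excludes leap_year < -15 (degenerate inputs where February has fewer than 13 days or a
-- negative length): there A's per-day simulation returns accidental counts no formula models,
-- while B assumes every month reaches a 13th. A's natural domain is leap_year ∈ {0, 1}.
def Pre_friday_13th (leap_year : Int) : Prop := -15 ≤ leap_year
instance (leap_year : Int) : Decidable (Pre_friday_13th leap_year) := by unfold Pre_friday_13th; infer_instance
def pvWitness_friday_13th : Int := (1)
def Spec_friday_13th (leap_year : Int) (out : List Int) : Prop := out = friday_13th_alt leap_year
instance (leap_year : Int) (out : List Int) : Decidable (Spec_friday_13th leap_year out) := by unfold Spec_friday_13th; infer_instance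

-- ===== CLAIM (what is proved, stated in full; the proofs are below) =====
def Claim_equal_friday_13th : Prop := ∀ (leap_year : Int), Dom_friday_13th leap_year → Pre_friday_13th leap_year → Spec_friday_13th leap_year (friday_13th leap_year)

-- ===== LEMMAS AND PROOFS =====

-- A's inner day step
def pvAStep (st : Int × Int) (day : Int) : Int × Int :=
  let week_day := PySem.Int.mod (st.1 + 1) 7
  let friday_13 := if week_day = 4 ∧ day = 12 then st.2 + 1 else st.2
  (week_day, friday_13)

-- A's per-month step (fold over the days of one month)
def pvAMonth (st : Int × Int) (month : Int) : Int × Int :=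
  (PySem.List.pyRange 0 month 1).foldl pvAStep st

-- month start offsets (B's prefix sums), recursively
def pvOffs (t : Int) : List Int → List Int
  | [] => []
  | m :: ms => t :: pvOffs (t + m) ms

-- B's count of Friday-13ths over a list of offsets, recursively
def pvCnt (s : Int) : List Int → Int
  | [] => 0
  | off :: offs => (if PySem.Int.mod (s + off + 13) 7 = 4 then 1 else 0) + pvCnt s offs

-- the day loop of one month in closed form: the weekday advances by n mod 7, and the count grows
-- by 1 exactly when the month reaches a 13th day that is a Friday
lemma pvDayLoop (n : Nat) (wd cnt : Int) (h0 : 0 ≤ wd) (h7 : wd < 7) :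
    (PySem.List.pyRange 0 (n : Int) 1).foldl pvAStep (wd, cnt)
      = (PySem.Int.mod (wd + n) 7,
         cnt + if 13 ≤ (n : Int) ∧ PySem.Int.mod (wd + 13) 7 = 4 then 1 else 0) := by
  induction n with
  | zero =>
      simp [PySem.List.pyRange_one_eq_nil, Prod.ext_iff]
      omega
  | succ n ih =>
      have hcast : ((n+1 : Nat) : Int) = (n : Int) + 1 := by push_cast; ring
      rw [hcast, PySem.List.pyRange_one_succ_right (by positivity), List.foldl_append, ih]
      simp only [List.foldl, pvAStep, PySem.Int.mod_eq_emod_of_pos (by norm_num : (0:Int) < 7)]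
      simp only [Prod.mk.injEq]
      constructor
      · omega
      · split_ifs <;> omega

-- a month of m : Int days contributes exactly its m.toNat many loop iterations
lemma pvAMonth_eq (st : Int × Int) (m : Int) :
    pvAMonth st m = (PySem.List.pyRange 0 ((m.toNat : Nat) : Int) 1).foldl pvAStep st := by
  unfold pvAMonth
  have h : (m - 0).toNat = ((m.toNat : Int) - 0).toNat := by omega
  rw [PySem.List.pyRange_one, PySem.List.pyRange_one, h]

-- invariant: A's month loop, entered with weekday (s+off) mod 7, counts exactly B's Fridays
lemma pvMonths (ms : List Int) (h : ∀ m ∈ ms, 13 ≤ m) (s off cnt : Int) :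
    (ms.foldl pvAMonth (PySem.Int.mod (s + off) 7, cnt)).2
      = cnt + pvCnt s (pvOffs off ms) := by
  induction ms generalizing off cnt with
  | nil => simp [pvOffs, pvCnt]
  | cons m ms ih =>
      have hm : 13 ≤ m := h m (List.mem_cons_self ..)
      simp only [List.foldl]
      rw [pvAMonth_eq, pvDayLoop _ _ _ (PySem.Int.mod_nonneg _ (by norm_num))
            (PySem.Int.mod_lt _ (by norm_num))]
      have hcast : ((m.toNat : Nat) : Int) = m := by omega
      rw [hcast]
      have h1 : PySem.Int.mod (PySem.Int.mod (s + off) 7 + m) 7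
          = PySem.Int.mod (s + (off + m)) 7 := by
        rw [PySem.Int.mod_eq_emod_of_pos (by norm_num), PySem.Int.mod_eq_emod_of_pos (by norm_num),
            PySem.Int.mod_eq_emod_of_pos (by norm_num)]
        omega
      have h2 : (13 ≤ m ∧ PySem.Int.mod (PySem.Int.mod (s + off) 7 + 13) 7 = 4)
          = (PySem.Int.mod (s + off + 13) 7 = 4) := by
        rw [PySem.Int.mod_eq_emod_of_pos (by norm_num), PySem.Int.mod_eq_emod_of_pos (by norm_num),
            PySem.Int.mod_eq_emod_of_pos (by norm_num)]
        apply propext; constructor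
        · intro hc; omega
        · intro hc; exact ⟨hm, by omega⟩
      rw [h1]
      simp only [h2]
      rw [ih (fun x hx => h x (List.mem_cons_of_mem _ hx))]
      simp only [pvOffs, pvCnt]
      split_ifs <;> ring

-- B's prefix-sum fold builds exactly pvOffs
lemma pvOffsFold (ms : List Int) (acc : List Int) (t : Int) :
    (ms.foldl (fun (st : List Int × Int) m => (st.1 ++ [st.2], st.2 + m)) (acc, t)).1
      = acc ++ pvOffs t ms := by
  induction ms generalizing acc t with
  | nil => simp [pvOffs]
  | cons m ms ih => simp [pvOffs, ih]

-- B's counting fold equals pvCnt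
lemma pvCntFold (s : Int) (offs : List Int) (c : Int) :
    offs.foldl (fun (acc : Int) off =>
        if PySem.Int.mod (s + off + 13) 7 = 4 then acc + 1 else acc) c
      = c + pvCnt s offs := by
  induction offs generalizing c with
  | nil => simp [pvCnt]
  | cons off offs ih =>
      simp only [List.foldl, pvCnt, ih]
      split_ifs <;> ring

lemma pvMain (ly : Int) (hly : -15 ≤ ly) : friday_13th ly = friday_13th_alt ly := by
  have hms : ∀ m ∈ ([31, 28 + ly, 31, 30, 31, 30, 31, 31, 30, 31, 30, 31] : List Int), 13 ≤ m := by
    intro m hm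
    simp only [List.mem_cons, List.not_mem_nil, or_false] at hm
    rcases hm with h|h|h|h|h|h|h|h|h|h|h|h <;> omega
  have hA : friday_13th ly =
      [(( [31, 28 + ly, 31, 30, 31, 30, 31, 31, 30, 31, 30, 31] : List Int).foldl pvAMonth (0, 0)).2,
       (( [31, 28 + ly, 31, 30, 31, 30, 31, 31, 30, 31, 30, 31] : List Int).foldl pvAMonth (1, 0)).2,
       (( [31, 28 + ly, 31, 30, 31, 30, 31, 31, 30, 31, 30, 31] : List Int).foldl pvAMonth (2, 0)).2,
       (( [31, 28 + ly, 31, 30, 31, 30, 31, 31, 30, 31, 30, 31] : List Int).foldl pvAMonth (3, 0)).2,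
       (( [31, 28 + ly, 31, 30, 31, 30, 31, 31, 30, 31, 30, 31] : List Int).foldl pvAMonth (4, 0)).2,
       (( [31, 28 + ly, 31, 30, 31, 30, 31, 31, 30, 31, 30, 31] : List Int).foldl pvAMonth (5, 0)).2,
       (( [31, 28 + ly, 31, 30, 31, 30, 31, 31, 30, 31, 30, 31] : List Int).foldl pvAMonth (6, 0)).2] := by
    set_option maxRecDepth 4000 in rfl
  have hB : friday_13th_alt ly =
      [0 + pvCnt 0 (pvOffs 0 ([31, 28 + ly, 31, 30, 31, 30, 31, 31, 30, 31, 30, 31] : List Int)),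
       0 + pvCnt 1 (pvOffs 0 ([31, 28 + ly, 31, 30, 31, 30, 31, 31, 30, 31, 30, 31] : List Int)),
       0 + pvCnt 2 (pvOffs 0 ([31, 28 + ly, 31, 30, 31, 30, 31, 31, 30, 31, 30, 31] : List Int)),
       0 + pvCnt 3 (pvOffs 0 ([31, 28 + ly, 31, 30, 31, 30, 31, 31, 30, 31, 30, 31] : List Int)),
       0 + pvCnt 4 (pvOffs 0 ([31, 28 + ly, 31, 30, 31, 30, 31, 31, 30, 31, 30, 31] : List Int)),
       0 + pvCnt 5 (pvOffs 0 ([31, 28 + ly, 31, 30, 31, 30, 31, 31, 30, 31, 30, 31] : List Int)),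
       0 + pvCnt 6 (pvOffs 0 ([31, 28 + ly, 31, 30, 31, 30, 31, 31, 30, 31, 30, 31] : List Int))] := by
    show friday_13th_alt ly = _
    unfold friday_13th_alt
    rw [show PySem.List.pyRange 0 7 1 = [0, 1, 2, 3, 4, 5, 6] from rfl]
    simp only [List.map]
    rw [pvOffsFold _ [] 0, List.nil_append,
        pvCntFold, pvCntFold, pvCntFold, pvCntFold, pvCntFold, pvCntFold, pvCntFold]
  rw [hA, hB]
  have hw : ∀ s : Int, 0 ≤ s → s < 7 → ((s, (0:Int)) : Int × Int) = (PySem.Int.mod (s + 0) 7, 0) := by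
    intro s h0 h7
    have : PySem.Int.mod (s + 0) 7 = s := by
      rw [PySem.Int.mod_eq_emod_of_pos (by norm_num)]; omega
    rw [this]
  rw [hw 0 (by norm_num) (by norm_num), hw 1 (by norm_num) (by norm_num),
      hw 2 (by norm_num) (by norm_num), hw 3 (by norm_num) (by norm_num),
      hw 4 (by norm_num) (by norm_num), hw 5 (by norm_num) (by norm_num),
      hw 6 (by norm_num) (by norm_num)]
  rw [pvMonths _ hms 0 0 0, pvMonths _ hms 1 0 0, pvMonths _ hms 2 0 0, pvMonths _ hms 3 0 0,
      pvMonths _ hms 4 0 0, pvMonths _ hms 5 0 0, pvMonths _ hms 6 0 0]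

-- ===== VERDICT (by name: the statement is the Claim_ definition above) =====
theorem friday_13th_spec : Claim_equal_friday_13th := by
  intro ly _ hpre
  unfold Spec_friday_13th
  exact pvMain ly hpre
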